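-- pv_equiv track=rewrite | github.com/gsethupathy5/AI_For_CS | python/2398.maximum-number-of-robots-within-budget/solution.py | maximumRobots
-- ===== SOURCE A (Python) =====
-- from typing import List
--
-- def maximumRobots(chargeTimes: List[int], runningCosts: List[int], budget: int) -> int:
--     max_robots = 0
--     for i in range(len(chargeTimes)):
--         total_cost = max(chargeTimes[:i+1]) + (i+1) * sum(runningCosts[:i+1])
--         if total_cost <= budget:
--             max_robots = i + 1
--         else:
--             break
--     return max_robots
-- ===== SOURCE B (Python) =====
-- def maximumRobots(chargeTimes, runningCosts, budget):
--     mx = None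
--     s = 0
--     for i, c in enumerate(chargeTimes):
--         mx = c if mx is None else max(mx, c)
--         if i < len(runningCosts):
--             s += runningCosts[i]
--         if mx + (i + 1) * s > budget:
--             return i
--     return len(chargeTimes)
-- ===== Notes on version B (the rewrite author's own statement) =====
-- stated objective: faster
-- what changed: replaces A's per-iteration max()/sum() over growing prefix slices with a single pass maintaining a running maximum and running prefix sum, returning at the first prefix over budget
import Mathlib
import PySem

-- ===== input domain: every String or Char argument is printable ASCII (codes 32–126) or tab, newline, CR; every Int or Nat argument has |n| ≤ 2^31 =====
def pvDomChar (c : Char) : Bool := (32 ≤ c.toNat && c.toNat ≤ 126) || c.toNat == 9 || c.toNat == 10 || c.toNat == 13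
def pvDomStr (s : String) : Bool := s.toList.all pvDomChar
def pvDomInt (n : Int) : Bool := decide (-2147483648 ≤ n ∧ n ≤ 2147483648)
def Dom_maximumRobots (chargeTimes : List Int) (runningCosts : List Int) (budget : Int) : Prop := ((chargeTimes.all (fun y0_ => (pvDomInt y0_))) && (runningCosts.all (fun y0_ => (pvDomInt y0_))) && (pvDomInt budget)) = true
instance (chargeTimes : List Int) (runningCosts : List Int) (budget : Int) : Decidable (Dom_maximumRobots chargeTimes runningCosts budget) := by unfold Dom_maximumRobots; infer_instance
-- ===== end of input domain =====

-- B replaces A's O(n^2) prefix-slice max()/sum() loop by one O(n) pass with a running max and running prefix sum.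

-- ===== PORT A =====
-- loop: for i in range(len(chargeTimes)): total = max(ct[:i+1]) + (i+1)*sum(rc[:i+1]); break on failure
def maximumRobotsGoA (chargeTimes runningCosts : List Int) (budget : Int) (i : Nat) (maxRobots : Int) : Int :=
  if i < chargeTimes.length then
    let totalCost :=
      (PySem.List.max? (PySem.List.slice chargeTimes none (some ((i : Int) + 1))) (fun y => y)).getD 0
        + ((i : Int) + 1) * (PySem.List.slice runningCosts none (some ((i : Int) + 1))).sum
    if totalCost ≤ budget then
      maximumRobotsGoA chargeTimes runningCosts budget (i + 1) ((i : Int) + 1)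
    else maxRobots
  else maxRobots
termination_by chargeTimes.length - i

def maximumRobots (chargeTimes : List Int) (runningCosts : List Int) (budget : Int) : Int :=
  maximumRobotsGoA chargeTimes runningCosts budget 0 0

-- ===== PORT B =====
-- single pass: mx = running max (None before first element), s = running prefix sum of runningCosts
def maximumRobotsGoB (runningCosts : List Int) (budget : Int) : List Int → Nat → Option Int → Int → Int
  | [], i, _, _ => (i : Int)
  | c :: cs, i, mx, s =>
    let mx' := match mx with | none => c | some m => max m c
    let s' := if i < runningCosts.length then s + (PySem.List.pyGet? runningCosts (i : Int)).getD 0 else s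
    if budget < mx' + ((i : Int) + 1) * s' then (i : Int)
    else maximumRobotsGoB runningCosts budget cs (i + 1) (some mx') s'

def maximumRobots_alt (chargeTimes : List Int) (runningCosts : List Int) (budget : Int) : Int :=
  maximumRobotsGoB runningCosts budget chargeTimes 0 none 0

-- ===== PRECONDITION & SPEC =====
def Spec_maximumRobots (chargeTimes : List Int) (runningCosts : List Int) (budget : Int) (out : Int) : Prop := out = maximumRobots_alt chargeTimes runningCosts budget
instance (chargeTimes : List Int) (runningCosts : List Int) (budget : Int) (out : Int) : Decidable (Spec_maximumRobots chargeTimes runningCosts budget out) := by unfold Spec_maximumRobots; infer_instance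

-- ===== CLAIM (what is proved, stated in full; the proofs are below) =====
def Claim_equal_maximumRobots : Prop := ∀ (chargeTimes : List Int) (runningCosts : List Int) (budget : Int), Dom_maximumRobots chargeTimes runningCosts budget → Spec_maximumRobots chargeTimes runningCosts budget (maximumRobots chargeTimes runningCosts budget)

-- ===== LEMMAS AND PROOFS =====

-- max over a prefix extended by one element, as B maintains it
lemma max?_append_singleton (l : List Int) (c : Int) :
    PySem.List.max? (l ++ [c]) (fun y => y)
      = some (match PySem.List.max? l (fun y => y) with | none => c | some m => max m c) := by
  cases l with
  | nil => simp [PySem.List.max?]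
  | cons x t =>
    simp [PySem.List.max?_id_cons, List.foldl_append]

-- running prefix sum extended by one element, as B maintains it
lemma take_succ_sum (rc : List Int) (i : Nat) :
    (rc.take (i + 1)).sum
      = (if i < rc.length then (rc.take i).sum + (PySem.List.pyGet? rc (i : Int)).getD 0
         else (rc.take i).sum) := by
  rw [List.take_add_one]
  by_cases h : i < rc.length
  · simp [h]
  · simp [h]

lemma goA_eq_goB (rc : List Int) (budget : Int) :
    ∀ (suf pre : List Int),
      maximumRobotsGoA (pre ++ suf) rc budget pre.length (pre.length : Int)
        = maximumRobotsGoB rc budget suf pre.length (PySem.List.max? pre (fun y => y)) ((rc.take pre.length).sum) := by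
  intro suf
  induction suf with
  | nil =>
    intro pre
    rw [maximumRobotsGoA, maximumRobotsGoB]
    simp
  | cons c cs ih =>
    intro pre
    rw [maximumRobotsGoA]
    simp only [maximumRobotsGoB]
    have hlen : pre.length < (pre ++ c :: cs).length := by simp
    have hslice : ∀ (xs : List Int),
        PySem.List.slice xs none (some ((pre.length : Int) + 1)) = xs.take (pre.length + 1) := by
      intro xs
      have := PySem.List.slice_to_natCast xs (pre.length + 1)
      simpa using this
    have htake : (pre ++ c :: cs).take (pre.length + 1) = pre ++ [c] := by
      rw [List.take_append]
      simp
    have hmax : (PySem.List.max? ((pre ++ c :: cs).take (pre.length + 1)) (fun y => y)).getD 0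
        = (match PySem.List.max? pre (fun y => y) with | none => c | some m => max m c) := by
      rw [htake, max?_append_singleton]
      rfl
    simp only [hlen, if_true, hslice, hmax, ← take_succ_sum rc pre.length]
    split_ifs with h1 h2 h2
    · omega
    · have := ih (pre ++ [c])
      simpa [max?_append_singleton] using this
    · rfl
    · omega

-- ===== VERDICT (by name: the statement is the Claim_ definition above) =====
theorem maximumRobots_spec : Claim_equal_maximumRobots := by
  intro ct rc budget _
  show maximumRobots ct rc budget = maximumRobots_alt ct rc budget
  have := goA_eq_goB rc budget ct []
  simpa [maximumRobots, maximumRobots_alt, PySem.List.max?] using this
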